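-- pv_equiv track=rewrite | github.com/Vikr-182/lidar-camera-calibration | eval_mcq.py | filter_bev
-- ===== SOURCE A (Python) =====
-- def filter_bev(json_list):
--     filtered_json = []
--     bag_of_words = [
--         "car", "truck", "bus", "trailer", "suv", "sedan", "toyota", "mercedes", "bmw", "police", "bike", "cycle", "motorcycle"
--     ]
--     for obj in json_list:
--         flag = False
--         for word in bag_of_words:
--             if word in obj["llm_message_fixed"].lower():
--                 flag = True
--         if flag:
--             filtered_json.append(obj)
--     return filtered_json
-- ===== SOURCE B (Python) =====
-- BAG_OF_WORDS = [
--     "car", "truck", "bus", "trailer", "suv", "sedan", "toyota", "mercedes", "bmw", "police", "bike", "cycle", "motorcycle"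
-- ]
--
-- # first-letter index: keywords grouped by their first character
-- _INDEX = {}
-- for _w in BAG_OF_WORDS:
--     _INDEX[_w[0]] = _INDEX.get(_w[0], []) + [_w]
--
-- def _has_vehicle_keyword(msg):
--     # single left-to-right scan: at each position try only the keywords
--     # whose first letter matches the character there
--     s = msg.lower()
--     for i, c in enumerate(s):
--         for w in _INDEX.get(c, []):
--             if s.startswith(w, i):
--                 return True
--     return False
--
-- def filter_bev(json_list):
--     return [obj for obj in json_list if _has_vehicle_keyword(obj["llm_message_fixed"])]
-- ===== Notes on version B (the rewrite author's own statement) =====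
-- stated objective: alternative
-- what changed: Replaces A's per-object loop over all 13 keywords with repeated substring searches by a single left-to-right scan over each lowered message that, at every position, tries only the keywords a first-letter index (dict built once from the keyword list) maps the character there to.
import Mathlib
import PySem

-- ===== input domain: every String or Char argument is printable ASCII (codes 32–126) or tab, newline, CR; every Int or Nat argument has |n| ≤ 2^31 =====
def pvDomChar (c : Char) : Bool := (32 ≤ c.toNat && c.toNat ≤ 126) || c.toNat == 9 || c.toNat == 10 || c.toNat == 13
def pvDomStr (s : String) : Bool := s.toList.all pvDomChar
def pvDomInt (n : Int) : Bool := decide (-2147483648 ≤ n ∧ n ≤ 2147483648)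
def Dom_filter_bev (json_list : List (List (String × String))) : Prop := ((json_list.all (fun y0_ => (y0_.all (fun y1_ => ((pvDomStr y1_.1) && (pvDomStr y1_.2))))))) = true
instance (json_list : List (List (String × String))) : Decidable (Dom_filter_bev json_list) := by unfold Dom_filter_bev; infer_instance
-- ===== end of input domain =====

-- B replaces A's per-keyword substring searches by one left-to-right scan of each lowered
-- message guided by a first-letter index of the keyword list (alternative decomposition).

-- ===== PORT A =====
def pvBag : List String :=
  ["car", "truck", "bus", "trailer", "suv", "sedan", "toyota", "mercedes", "bmw", "police", "bike", "cycle", "motorcycle"]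

def filter_bev (json_list : List (List (String × String))) : List (List (String × String)) :=
  json_list.foldl (fun filtered_json obj =>
    let msg := PySem.Dict.getD (PySem.Dict.mk obj) "llm_message_fixed" ""   -- total stand-in; Pre_ guarantees the key is present (KeyError otherwise)
    let flag := pvBag.foldl (fun flag word =>
      if PySem.Str.isIn word (PySem.Str.lower msg) then true else flag) false
    if flag then filtered_json ++ [obj] else filtered_json) []

-- ===== PORT B =====
-- module-level index build: _INDEX[w[0]] = _INDEX.get(w[0], []) + [w]
def pvIndex : PySem.Dict Char (List String) :=
  pvBag.foldl (fun d w =>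
    let c := w.toList.headD ' '   -- w[0]; exact here: every bag word is a nonempty literal
    d.insert c (d.getD c [] ++ [w])) PySem.Dict.empty

def pvHasVehicleKeyword (msg : String) : Bool :=
  let s := PySem.Chars.lower msg.toList
  (PySem.List.enumerate s).any (fun ic =>
    (PySem.Dict.getD pvIndex ic.2 []).any (fun w =>
      -- s.startswith(w, i) with 0 ≤ i ≤ len(s): exact as startswith of s[i:]
      PySem.Chars.startswith (s.drop ic.1.toNat) w.toList))

def filter_bev_alt (json_list : List (List (String × String))) : List (List (String × String)) :=
  json_list.filter (fun obj => pvHasVehicleKeyword (PySem.Dict.getD (PySem.Dict.mk obj) "llm_message_fixed" ""))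

-- ===== PRECONDITION & SPEC =====
-- Pre_ excludes exactly the inputs on which A raises KeyError: an object without the "llm_message_fixed" key.
def Pre_filter_bev (json_list : List (List (String × String))) : Prop :=
  ∀ obj ∈ json_list, PySem.Dict.contains (PySem.Dict.mk obj) "llm_message_fixed" = true
instance (json_list : List (List (String × String))) : Decidable (Pre_filter_bev json_list) := by unfold Pre_filter_bev; infer_instance

def pvWitness_filter_bev : (List (List (String × String))) :=
  [[("llm_message_fixed", "a red Car"), ("id", "1")], [("llm_message_fixed", "a tree")]]

def Spec_filter_bev (json_list : List (List (String × String))) (out : List (List (String × String))) : Prop := out = filter_bev_alt json_list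
instance (json_list : List (List (String × String))) (out : List (List (String × String))) : Decidable (Spec_filter_bev json_list out) := by unfold Spec_filter_bev; infer_instance

-- ===== CLAIM =====
def Claim_equal_filter_bev : Prop := ∀ (json_list : List (List (String × String))), Dom_filter_bev json_list → Pre_filter_bev json_list → Spec_filter_bev json_list (filter_bev json_list)

-- ===== LEMMAS AND PROOFS =====
-- A's exhaustive flag loop computes List.any.
theorem flag_foldl_eq_any (l : List String) (f : String → Bool) (b : Bool) :
    l.foldl (fun flag word => if f word then true else flag) b = (b || l.any f) := by
  induction l generalizing b with
  | nil => simp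
  | cons x xs ih =>
    simp only [List.foldl_cons, List.any_cons, ih]
    by_cases h : f x = true <;> simp [h]

-- the index built by the module-level loop, as a literal
theorem pvIndex_eq : pvIndex = PySem.Dict.mk
    [('c', ["car", "cycle"]), ('t', ["truck", "trailer", "toyota"]), ('b', ["bus", "bmw", "bike"]),
     ('s', ["suv", "sedan"]), ('m', ["mercedes", "motorcycle"]), ('p', ["police"])] := by decide

theorem mem_bucket_iff (c : Char) (w : String) :
    w ∈ PySem.Dict.getD pvIndex c [] ↔ w ∈ pvBag ∧ w.toList.head? = some c := by
  rw [pvIndex_eq, PySem.Dict.getD_eq_get?_getD]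
  simp only [PySem.Dict.get?_mk_cons]
  split_ifs with h1 h2 h3 h4 h5 h6
  · cases (eq_of_beq h1)
    simp only [Option.getD_some, List.mem_cons, List.not_mem_nil, or_false]
    constructor
    · rintro (rfl|rfl) <;> decide
    · rintro ⟨hb, hh⟩; fin_cases hb <;> (revert hh; decide)
  · cases (eq_of_beq h2)
    simp only [Option.getD_some, List.mem_cons, List.not_mem_nil, or_false]
    constructor
    · rintro (rfl|rfl|rfl) <;> decide
    · rintro ⟨hb, hh⟩; fin_cases hb <;> (revert hh; decide)
  · cases (eq_of_beq h3)
    simp only [Option.getD_some, List.mem_cons, List.not_mem_nil, or_false]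
    constructor
    · rintro (rfl|rfl|rfl) <;> decide
    · rintro ⟨hb, hh⟩; fin_cases hb <;> (revert hh; decide)
  · cases (eq_of_beq h4)
    simp only [Option.getD_some, List.mem_cons, List.not_mem_nil, or_false]
    constructor
    · rintro (rfl|rfl) <;> decide
    · rintro ⟨hb, hh⟩; fin_cases hb <;> (revert hh; decide)
  · cases (eq_of_beq h5)
    simp only [Option.getD_some, List.mem_cons, List.not_mem_nil, or_false]
    constructor
    · rintro (rfl|rfl) <;> decide
    · rintro ⟨hb, hh⟩; fin_cases hb <;> (revert hh; decide)
  · cases (eq_of_beq h6)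
    simp only [Option.getD_some, List.mem_cons, List.not_mem_nil, or_false]
    constructor
    · rintro (rfl) ; decide
    · rintro ⟨hb, hh⟩; fin_cases hb <;> (revert hh; decide)
  · simp only [PySem.Dict.get?, List.find?_nil, Option.map_none, Option.getD_none,
      List.not_mem_nil, false_iff, not_and]
    intro hb hh
    fin_cases hb <;> simp_all

theorem bag_ne_nil (w : String) (h : w ∈ pvBag) : w.toList ≠ [] := by
  fin_cases h <;> decide

theorem scan_eq_any (s : List Char) :
    ((PySem.List.enumerate s).any (fun ic =>
      (PySem.Dict.getD pvIndex ic.2 []).any (fun w =>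
        PySem.Chars.startswith (s.drop ic.1.toNat) w.toList)))
    = pvBag.any (fun w => PySem.Chars.isIn w.toList s) := by
  rw [Bool.eq_iff_iff]
  simp only [List.any_eq_true]
  constructor
  · rintro ⟨ic, hmem, w, hw, hsw⟩
    rw [PySem.List.mem_enumerate_iff] at hmem
    obtain ⟨k, hk, rfl⟩ := hmem
    refine ⟨w, (mem_bucket_iff _ _ |>.mp hw).1, ?_⟩
    rw [← PySem.Chars.exists_prefix_drop_iff_isIn]
    refine ⟨k, ?_⟩
    rw [PySem.Chars.startswith_iff] at hsw
    simpa using hsw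
  · rintro ⟨w, hw, hin⟩
    obtain ⟨j, hpref⟩ := (PySem.Chars.exists_prefix_drop_iff_isIn (sub := w.toList) (s := s)).mpr hin
    have hne := bag_ne_nil w hw
    have hj : j < s.length := by
      by_contra hle
      rw [List.drop_eq_nil_of_le (by omega)] at hpref
      exact hne (List.prefix_nil.mp hpref)
    refine ⟨((j : Int), s[j]), ?_, w, ?_, ?_⟩
    · rw [PySem.List.mem_enumerate_iff]
      exact ⟨j, hj, by simp⟩
    · rw [mem_bucket_iff]
      refine ⟨hw, ?_⟩
      obtain ⟨t, ht⟩ := hpref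
      have hh : (s.drop j).head? = some s[j] := by
        rw [List.head?_drop, List.getElem?_eq_getElem hj]
      rw [← ht] at hh
      cases hc : w.toList with
      | nil => exact absurd hc hne
      | cons a l => rw [hc] at hh; simpa using hh
    · rw [PySem.Chars.startswith_iff]
      simpa using hpref

-- ===== VERDICT =====
theorem filter_bev_spec : Claim_equal_filter_bev := by
  intro json_list _ _
  unfold Spec_filter_bev filter_bev filter_bev_alt
  simp only [flag_foldl_eq_any, Bool.false_or]
  rw [PySem.List.foldl_append_if_eq_filter]
  apply List.filter_congr
  intro obj _
  simp only [pvHasVehicleKeyword, scan_eq_any, PySem.Str.isIn_eq, PySem.Str.toList_lower]
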